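-- pv_equiv track=rewrite | github.com/kangraemin/stock-bot | experiments/regime_deep_backtest.py | apply_confirmation
-- ===== SOURCE A (Python) =====
-- def apply_confirmation(raw_regimes, confirm_days):
--     if confirm_days <= 1:
--         return raw_regimes
--     n = len(raw_regimes)
--     confirmed = [raw_regimes[0]] * n
--     streak = 1
--     prev_raw = raw_regimes[0]
--     current = raw_regimes[0]
--     for i in range(1, n):
--         if raw_regimes[i] == prev_raw:
--             streak += 1
--         else:
--             streak = 1
--             prev_raw = raw_regimes[i]
--         if streak >= confirm_days:
--             current = raw_regimes[i]
--         confirmed[i] = current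
--     return confirmed
-- ===== SOURCE B (Python) =====
-- def apply_confirmation(raw_regimes, confirm_days):
--     if confirm_days <= 1:
--         return raw_regimes
--     current = raw_regimes[0]
--     out = []
--     i, n = 0, len(raw_regimes)
--     while i < n:
--         v = raw_regimes[i]
--         j = i + 1
--         while j < n and raw_regimes[j] == v:
--             j += 1
--         run_len = j - i
--         if run_len >= confirm_days:
--             out.extend([current] * (confirm_days - 1))
--             out.extend([v] * (run_len - confirm_days + 1))
--             current = v
--         else:
--             out.extend([current] * run_len)
--         i = j
--     return out
-- ===== Notes on version B (the rewrite author's own statement) =====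
-- stated objective: alternative
-- what changed: B replaces A's per-element streak/prev-state scan by a run-based pass: it splits the input into maximal runs of equal values and emits each run as two replicate blocks (confirm_days-1 copies of the carried label, then the run's value once confirmed), instead of updating streak/prev_raw/current at every index.
import Mathlib
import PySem

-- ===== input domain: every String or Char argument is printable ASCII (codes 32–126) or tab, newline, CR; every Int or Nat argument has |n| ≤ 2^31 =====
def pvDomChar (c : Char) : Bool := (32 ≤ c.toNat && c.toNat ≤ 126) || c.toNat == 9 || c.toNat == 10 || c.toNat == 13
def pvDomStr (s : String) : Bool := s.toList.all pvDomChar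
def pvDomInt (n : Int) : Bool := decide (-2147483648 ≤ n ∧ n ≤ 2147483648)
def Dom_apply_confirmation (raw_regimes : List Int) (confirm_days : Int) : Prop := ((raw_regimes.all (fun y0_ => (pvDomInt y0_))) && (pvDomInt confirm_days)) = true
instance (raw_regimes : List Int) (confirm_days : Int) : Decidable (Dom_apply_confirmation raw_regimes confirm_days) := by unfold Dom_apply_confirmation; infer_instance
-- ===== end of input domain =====

-- B replaces A's per-element streak/prev-state scan by a run-based pass emitting replicate blocks
-- per maximal run; equal return values proved on Pre_ (nonempty input, or confirm_days ≤ 1).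

-- ===== PORT A =====
-- loop body of A's for-loop, state (confirmed, streak, prev_raw, current)
def stepA (raw_regimes : List Int) (confirm_days : Int)
    (st : List Int × Int × Int × Int) (i : Int) : List Int × Int × Int × Int :=
  match st with
  | (confirmed, streak, prev_raw, current) =>
    let x := PySem.List.pyGetD raw_regimes i 0   -- raw_regimes[i]; i ∈ range(1, n) is always in range
    let streak' := if x = prev_raw then streak + 1 else 1
    let prev' := if x = prev_raw then prev_raw else x
    let current' := if confirm_days ≤ streak' then x else current
    (confirmed.set i.toNat current', streak', prev', current')

def apply_confirmation (raw_regimes : List Int) (confirm_days : Int) : List Int :=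
  if confirm_days ≤ 1 then raw_regimes
  else
    let n : Int := raw_regimes.length
    -- raw_regimes[0]: IndexError on the empty list, excluded by Pre_ (default 0 never observed there)
    let first := PySem.List.pyGetD raw_regimes 0 0
    ((PySem.List.pyRange 1 n 1).foldl (stepA raw_regimes confirm_days)
      (List.replicate raw_regimes.length first, 1, first, first)).1

-- ===== PORT B =====
-- run-based emission: peel the maximal run of the head value, emit its two blocks, recurse on the rest
def bRuns (confirm_days : Int) (current : Int) : List Int → List Int
  | [] => []
  | v :: rest =>
    let run := rest.takeWhile (· == v)
    let tail := rest.dropWhile (· == v)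
    let run_len : Int := run.length + 1
    if confirm_days ≤ run_len then
      List.replicate (confirm_days - 1).toNat current ++
      List.replicate (run_len - (confirm_days - 1)).toNat v ++
      bRuns confirm_days v tail
    else
      List.replicate run_len.toNat current ++ bRuns confirm_days current tail
  termination_by l => l.length
  decreasing_by
    all_goals
      simp only [List.length_cons]
      exact Nat.lt_succ_of_le (List.length_dropWhile_le _ _)

def apply_confirmation_alt (raw_regimes : List Int) (confirm_days : Int) : List Int :=
  if confirm_days ≤ 1 then raw_regimes
  else
    -- raw_regimes[0]: IndexError on the empty list, excluded by Pre_
    let current := PySem.List.pyGetD raw_regimes 0 0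
    bRuns confirm_days current raw_regimes

-- ===== PRECONDITION & SPEC =====
-- Pre_ excludes only the inputs where A (and B) raise IndexError: empty list with confirm_days > 1.
def Pre_apply_confirmation (raw_regimes : List Int) (confirm_days : Int) : Prop :=
  confirm_days ≤ 1 ∨ raw_regimes ≠ []
instance (raw_regimes : List Int) (confirm_days : Int) : Decidable (Pre_apply_confirmation raw_regimes confirm_days) := by unfold Pre_apply_confirmation; infer_instance

def pvWitness_apply_confirmation : List Int × Int := ([1, 1, -1, -1, -1, 1, 0], 2)

def Spec_apply_confirmation (raw_regimes : List Int) (confirm_days : Int) (out : List Int) : Prop := out = apply_confirmation_alt raw_regimes confirm_days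
instance (raw_regimes : List Int) (confirm_days : Int) (out : List Int) : Decidable (Spec_apply_confirmation raw_regimes confirm_days out) := by unfold Spec_apply_confirmation; infer_instance

-- ===== CLAIM (what is proved, stated in full; the proofs are below) =====
def Claim_equal_apply_confirmation : Prop := ∀ (raw_regimes : List Int) (confirm_days : Int), Dom_apply_confirmation raw_regimes confirm_days → Pre_apply_confirmation raw_regimes confirm_days → Spec_apply_confirmation raw_regimes confirm_days (apply_confirmation raw_regimes confirm_days)

-- ===== LEMMAS AND PROOFS =====

-- per-element reference recursion: exactly A's state update, emitting one output per element
def refLoop (confirm_days : Int) : Int → Int → Int → List Int → List Int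
  | _, _, _, [] => []
  | streak, prev_raw, current, x :: rest =>
    let streak' := if x = prev_raw then streak + 1 else 1
    let prev' := if x = prev_raw then prev_raw else x
    let current' := if confirm_days ≤ streak' then x else current
    current' :: refLoop confirm_days streak' prev' current' rest

-- (acc ++ y :: ys).set acc.length z = acc ++ z :: ys
lemma set_append_length {α : Type} (acc : List α) (y z : α) (ys : List α) :
    (acc ++ y :: ys).set acc.length z = acc ++ z :: ys := by
  induction acc with
  | nil => simp
  | cons a as ih => simp [ih]

-- A's indexed foldl, started after a processed prefix, appends exactly refLoop's outputs
lemma lemA (cd : Int) : ∀ (u pre acc : List Int) (d s p c : Int), pre.length = acc.length →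
    ((PySem.List.pyRange (acc.length : Int) ((pre.length + u.length : Nat) : Int) 1).foldl
      (stepA (pre ++ u) cd) (acc ++ List.replicate u.length d, s, p, c)).1
    = acc ++ refLoop cd s p c u := by
  intro u
  induction u with
  | nil =>
    intro pre acc d s p c hlen
    rw [hlen, PySem.List.pyRange_one_eq_nil (by simp)]
    simp [refLoop]
  | cons x u' ih =>
    intro pre acc d s p c hlen
    rw [PySem.List.pyRange_one_cons (by simp only [List.length_cons]; push_cast; omega), List.foldl_cons]
    have hx : PySem.List.pyGetD (pre ++ x :: u') (acc.length : Int) 0 = x := by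
      rw [← hlen, PySem.List.pyGetD_natCast]; simp
    have hstep : stepA (pre ++ x :: u') cd (acc ++ List.replicate (x :: u').length d, s, p, c) (acc.length : Int)
        = ((acc ++ [(if cd ≤ (if x = p then s + 1 else 1) then x else c)]) ++ List.replicate u'.length d,
           (if x = p then s + 1 else 1),
           (if x = p then p else x),
           (if cd ≤ (if x = p then s + 1 else 1) then x else c)) := by
      simp only [stepA, hx, List.length_cons, List.replicate_succ, Int.toNat_natCast, set_append_length,
        List.append_assoc, List.singleton_append]
    rw [hstep]
    have h2 : ((pre ++ [x]).length + u'.length : Nat) = (pre.length + (x :: u').length : Nat) := by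
      simp; omega
    have h3 : ((acc ++ [(if cd ≤ (if x = p then s + 1 else 1) then x else c)]).length : Int) = (acc.length : Int) + 1 := by
      simp
    have := ih (pre ++ [x]) (acc ++ [(if cd ≤ (if x = p then s + 1 else 1) then x else c)]) d
      (if x = p then s + 1 else 1) (if x = p then p else x) (if cd ≤ (if x = p then s + 1 else 1) then x else c)
      (by simp [hlen])
    rw [h2, h3] at this
    simp only [List.append_assoc, List.singleton_append] at this ⊢
    rw [this]
    simp [refLoop]

-- refLoop on a block of m copies of v: outputs switch from current to v once the streak reaches cd
lemma subRun (cd : Int) : ∀ (m : Nat) (j v c : Int) (rest : List Int),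
    1 ≤ j → (cd ≤ j → c = v) →
    refLoop cd j v c (List.replicate m v ++ rest)
    = List.replicate (min m (cd - 1 - j).toNat) c ++ List.replicate (m - (cd - 1 - j).toNat) v
      ++ refLoop cd (j + m) v (if cd ≤ j + m then v else c) rest := by
  intro m
  induction m with
  | zero =>
    intro j v c rest hj hcv
    by_cases h : cd ≤ j
    · simp [h, hcv h]
    · simp [h]
  | succ m ih =>
    intro j v c rest hj hcv
    rw [List.replicate_succ, List.cons_append]
    by_cases h : cd ≤ j + 1
    · have e1 : refLoop cd j v c (v :: (List.replicate m v ++ rest))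
          = v :: refLoop cd (j + 1) v v (List.replicate m v ++ rest) := by
        simp [refLoop, h]
      rw [e1, ih (j + 1) v v rest (by omega) (fun _ => rfl)]
      have t0 : (cd - 1 - j).toNat = 0 := by omega
      have t1 : (cd - 1 - (j + 1)).toNat = 0 := by omega
      have hjm : cd ≤ j + (↑m + 1) := by omega
      have hjm' : cd ≤ j + 1 + ↑m := by omega
      simp [t0, t1, hjm, hjm', List.replicate_succ]
      rw [show j + 1 + (m : Int) = j + ((m : Int) + 1) from by ring]
    · have e1 : refLoop cd j v c (v :: (List.replicate m v ++ rest))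
          = c :: refLoop cd (j + 1) v c (List.replicate m v ++ rest) := by
        simp [refLoop, h]
      rw [e1, ih (j + 1) v c rest (by omega) (by omega)]
      have t1 : (cd - 1 - j).toNat = (cd - 1 - (j + 1)).toNat + 1 := by omega
      have tmin : min (m + 1) (cd - 1 - j).toNat = min m (cd - 1 - (j + 1)).toNat + 1 := by omega
      have tsub : (m + 1) - (cd - 1 - j).toNat = m - (cd - 1 - (j + 1)).toNat := by omega
      have hadd : j + 1 + (m : Int) = j + ((m : Int) + 1) := by ring
      rw [tmin, tsub, hadd]
      simp [List.replicate_succ]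


lemma head?_dropWhile_ne (l : List Int) (v : Int) : (l.dropWhile (· == v)).head? ≠ some v := by
  induction l with
  | nil => simp
  | cons a as ih =>
    by_cases h : a = v
    · simpa [h] using ih
    · simp [h]

lemma takeWhile_eq_rep (l : List Int) (v : Int) :
    l.takeWhile (· == v) = List.replicate (l.takeWhile (· == v)).length v :=
  List.eq_replicate_of_mem (fun b hb => by simpa using List.mem_takeWhile_imp hb)

-- at a run boundary refLoop coincides with B's run-based recursion
lemma mainLemma (cd : Int) (hcd : 1 < cd) : ∀ (l : List Int) (s p c : Int),
    l.head? ≠ some p → refLoop cd s p c l = bRuns cd c l := by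
  suffices H : ∀ n (l : List Int) (s p c : Int), l.length ≤ n → l.head? ≠ some p →
      refLoop cd s p c l = bRuns cd c l by
    intro l s p c h; exact H l.length l s p c le_rfl h
  intro n
  induction n with
  | zero =>
    intro l s p c hlen hhd
    rw [Nat.le_zero, List.length_eq_zero_iff] at hlen
    subst hlen
    simp [refLoop, bRuns]
  | succ n ih =>
    intro l s p c hlen hhd
    match l with
    | [] => simp [refLoop, bRuns]
    | v :: rest =>
      have hvp : v ≠ p := by simpa using hhd
      have hrest : rest = List.replicate (rest.takeWhile (· == v)).length v
          ++ rest.dropWhile (· == v) := by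
        conv_lhs => rw [← List.takeWhile_append_dropWhile (p := (· == v)) (l := rest)]
        rw [← takeWhile_eq_rep]
      have htail : (rest.dropWhile (· == v)).head? ≠ some v := head?_dropWhile_ne _ _
      have hlen2 : (rest.dropWhile (· == v)).length ≤ n := by
        have := List.length_dropWhile_le (p := (· == v)) (l := rest)
        simp at hlen; omega
      have e1 : refLoop cd s p c (v :: rest) = c :: refLoop cd 1 v c rest := by
        simp [refLoop, hvp, show ¬ cd ≤ 1 by omega]
      rw [e1]
      conv_lhs => rw [hrest]
      rw [subRun cd _ 1 v c _ le_rfl (by omega)]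
      rw [ih _ _ v _ hlen2 htail]
      rw [show bRuns cd c (v :: rest)
            = (if cd ≤ ((rest.takeWhile (· == v)).length : Int) + 1 then
                List.replicate (cd - 1).toNat c ++
                List.replicate ((((rest.takeWhile (· == v)).length : Int) + 1) - (cd - 1)).toNat v ++
                bRuns cd v (rest.dropWhile (· == v))
              else
                List.replicate (((rest.takeWhile (· == v)).length : Int) + 1).toNat c ++
                bRuns cd c (rest.dropWhile (· == v)))
        from by rw [bRuns]]
      set m := (rest.takeWhile (· == v)).length with hm
      by_cases hc : cd ≤ (m : Int) + 1
      · rw [if_pos hc]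
        have hc1 : cd ≤ 1 + (m : Int) := by omega
        rw [if_pos hc1]
        have a1 : (cd - 1).toNat = (cd - 1 - 1).toNat + 1 := by omega
        have a2 : min m (cd - 1 - 1).toNat = (cd - 1 - 1).toNat := by omega
        have a3 : ((((m : Int)) + 1) - (cd - 1)).toNat = m - (cd - 1 - 1).toNat := by omega
        rw [a1, a2, a3, List.replicate_succ]
        simp
      · rw [if_neg hc]
        have hc1 : ¬ cd ≤ 1 + (m : Int) := by omega
        rw [if_neg hc1]
        have a1 : (((m : Int)) + 1).toNat = m + 1 := by omega
        have a2 : min m (cd - 1 - 1).toNat = m := by omega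
        have a3 : m - (cd - 1 - 1).toNat = 0 := by omega
        rw [a1, a2, a3, List.replicate_succ]
        simp

-- top-level B shape on a nonempty list
lemma topEq (cd : Int) (hcd : 1 < cd) (h : Int) (t : List Int) :
    bRuns cd h (h :: t) = h :: refLoop cd 1 h h t := by
  have hrest : t = List.replicate (t.takeWhile (· == h)).length h
      ++ t.dropWhile (· == h) := by
    conv_lhs => rw [← List.takeWhile_append_dropWhile (p := (· == h)) (l := t)]
    rw [← takeWhile_eq_rep]
  conv_rhs => rw [hrest]
  rw [subRun cd _ 1 h h _ le_rfl (fun _ => rfl)]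
  rw [mainLemma cd hcd _ _ h _ (head?_dropWhile_ne _ _)]
  rw [show (if cd ≤ 1 + ((t.takeWhile (· == h)).length : Int) then h else h) = h from by simp]
  rw [bRuns]
  set m := (t.takeWhile (· == h)).length with hm
  by_cases hc : cd ≤ (m : Int) + 1
  · rw [if_pos hc]
    have a1 : (cd - 1).toNat + ((((m : Int)) + 1) - (cd - 1)).toNat = m + 1 := by omega
    have a2 : min m (cd - 1 - 1).toNat + (m - (cd - 1 - 1).toNat) = m := by omega
    simp only [← List.replicate_add]
    rw [a1, a2]
    simp [List.replicate_succ]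
  · rw [if_neg hc]
    have a1 : (((m : Int)) + 1).toNat = m + 1 := by omega
    have a2 : min m (cd - 1 - 1).toNat + (m - (cd - 1 - 1).toNat) = m := by omega
    rw [a1]
    simp only [← List.replicate_add]
    rw [a2]
    simp [List.replicate_succ]

-- ===== VERDICT (by name: the statement is the Claim_ definition above) =====
theorem apply_confirmation_spec : Claim_equal_apply_confirmation := by
  intro raw cd _hDom hPre
  unfold Spec_apply_confirmation
  by_cases h1 : cd ≤ 1
  · simp [apply_confirmation, apply_confirmation_alt, h1]
  · cases raw with
    | nil =>
      rcases hPre with h | h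
      · omega
      · exact absurd rfl h
    | cons h t =>
      have hg : PySem.List.pyGetD ((h :: t) : List Int) (0 : Int) 0 = h := by
        simp [PySem.List.pyGetD]
      simp only [apply_confirmation, apply_confirmation_alt, if_neg h1, hg]
      rw [topEq cd (by omega) h t]
      have hA := lemA cd t [h] [h] h 1 h h rfl
      simp only [List.singleton_append, List.length_cons, List.length_nil] at hA ⊢
      convert hA using 3
      · congr 1
        push_cast
        ring
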